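-- pv_equiv track=rewrite | github.com/lodrantl/programiranje_1 | izpiti/2016-02-02.py | naloga2c2
-- ===== SOURCE A (Python) =====
-- def naloga2c2(zap):
--     if not zap:
--         return 0
--
--     naj = 1  # Dolžina najdaljšega, ki smo ga odkrili do sedaj.
--     zacetek = {zap[0]: 0}  # zacetek[x] je indeks prve pojavitve elementa x v trenutnem drobencljavem zaporedju.
--
--     n = len(zap)
--     for i in range(1, n):
--         x = zap[i]
--         if abs(x - zap[i - 1]) != 1:
--             # Zaporedje je prekinjeno, začeti je treba znova.
--             zacetek.clear()
--             zacetek[x] = i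
--         else:
--             # Saga se nadaljuje.
--             if x not in zacetek:
--                 # Število x se pojavi prvič.
--                 zacetek[x] = i
--             else:
--                 # Število se ne pojavi prvič.
--                 dolzina = i - zacetek[x] + 1
--                 naj = max(dolzina, naj)
--
--     return naj
-- ===== SOURCE B (Python) =====
-- def naloga2c2(zap):
--     # Two-pass decomposition: first split the list into maximal |diff|=1 segments,
--     # then per segment build a first-occurrence index and take the best span.
--     if not zap:
--         return 0
--     n = len(zap)
--     starts = [0]
--     for i in range(1, n):
--         if abs(zap[i] - zap[i - 1]) != 1:
--             starts.append(i)
--     best = 1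
--     for (s, e) in zip(starts, starts[1:] + [n]):
--         first = {}
--         for i in range(s, e):
--             first.setdefault(zap[i], i)
--         for i in range(s, e):
--             best = max(best, i - first[zap[i]] + 1)
--     return best
-- ===== Notes on version B (the rewrite author's own statement) =====
-- stated objective: alternative
-- what changed: A's single fused loop (dict cleared in place at each break, max interleaved with the membership test) is replaced by a two-pass decomposition: one pass computes the start indices of the maximal |diff|=1 segments, then each segment is analysed on its own with a setdefault first-occurrence dict built in a separate pass followed by a span-maximising pass.
import Mathlib
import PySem

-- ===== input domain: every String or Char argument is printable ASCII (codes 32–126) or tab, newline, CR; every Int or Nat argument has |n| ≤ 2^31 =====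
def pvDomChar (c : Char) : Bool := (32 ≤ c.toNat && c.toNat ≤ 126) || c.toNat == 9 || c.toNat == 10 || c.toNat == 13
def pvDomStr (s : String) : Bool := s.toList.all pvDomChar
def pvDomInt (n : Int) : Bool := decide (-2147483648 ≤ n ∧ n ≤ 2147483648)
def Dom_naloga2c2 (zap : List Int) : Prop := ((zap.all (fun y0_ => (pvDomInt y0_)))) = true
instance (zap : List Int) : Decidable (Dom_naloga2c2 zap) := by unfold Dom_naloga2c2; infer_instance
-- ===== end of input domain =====

-- B replaces A's single fused loop (dict cleared at every break) with a two-pass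
-- decomposition: segment the list at |diff| ≠ 1 breaks, then analyse each segment
-- with a setdefault first-occurrence dict and a separate span pass (objective: alternative).

-- ===== PORT A =====
-- loop body of A's `for i in range(1, n)` (indices always in range, so pyGetD is exact)
def najBody (zap : List Int) (st : Int × PySem.Dict Int Int) (i : Int) : Int × PySem.Dict Int Int :=
  let x := PySem.List.pyGetD zap i 0
  if (x - PySem.List.pyGetD zap (i - 1) 0).natAbs ≠ 1 then
    -- zacetek.clear(); zacetek[x] = i
    (st.1, PySem.Dict.insert PySem.Dict.empty x i)
  else if st.2.contains x = false then
    -- x not in zacetek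
    (st.1, st.2.insert x i)
  else
    -- dolzina = i - zacetek[x] + 1; naj = max(dolzina, naj)   (key present, getD exact)
    (max (i - st.2.getD x 0 + 1) st.1, st.2)

def naloga2c2 (zap : List Int) : Int :=
  match zap with
  | [] => 0
  | x0 :: _ =>
    ((PySem.List.pyRange 1 (PySem.List.len zap) 1).foldl (najBody zap)
      (1, PySem.Dict.insert PySem.Dict.empty x0 0)).1

-- ===== PORT B =====
-- first-occurrence dict of segment [s, e)  (first.setdefault(zap[i], i))
def altFirst (zap : List Int) (s e : Int) : PySem.Dict Int Int :=
  (PySem.List.pyRange s e 1).foldl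
    (fun d i => d.setdefault (PySem.List.pyGetD zap i 0) i) PySem.Dict.empty

-- per-segment body of B's outer loop: build `first`, then the span pass
def altSeg (zap : List Int) (best : Int) (se : Int × Int) : Int :=
  let first := altFirst zap se.1 se.2
  (PySem.List.pyRange se.1 se.2 1).foldl
    (fun b i => max b (i - first.getD (PySem.List.pyGetD zap i 0) 0 + 1)) best

def naloga2c2_alt (zap : List Int) : Int :=
  match zap with
  | [] => 0
  | _ :: _ =>
    let n : Int := PySem.List.len zap
    let starts : List Int := (PySem.List.pyRange 1 n 1).foldl
      (fun acc i =>
        if (PySem.List.pyGetD zap i 0 - PySem.List.pyGetD zap (i - 1) 0).natAbs ≠ 1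
        then acc ++ [i] else acc) [0]
    (starts.zip (starts.tail ++ [n])).foldl (altSeg zap) 1

-- ===== PRECONDITION & SPEC =====
def Spec_naloga2c2 (zap : List Int) (out : Int) : Prop := out = naloga2c2_alt zap
instance (zap : List Int) (out : Int) : Decidable (Spec_naloga2c2 zap out) := by unfold Spec_naloga2c2; infer_instance

-- ===== CLAIM (what is proved, stated in full; the proofs are below) =====
def Claim_equal_naloga2c2 : Prop := ∀ (zap : List Int), Dom_naloga2c2 zap → Spec_naloga2c2 zap (naloga2c2 zap)

-- ===== LEMMAS AND PROOFS =====

-- element access shorthand used throughout the proofs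
def pvG (zap : List Int) (i : Int) : Int := PySem.List.pyGetD zap i 0
-- "index i is a break point" (the test both ports make)
def pvBrk (zap : List Int) (i : Int) : Bool := (pvG zap i - pvG zap (i - 1)).natAbs != 1
-- the break indices of range [a, n)
def pvBrks (zap : List Int) (a n : Int) : List Int :=
  (PySem.List.pyRange a n 1).filter (fun i => pvBrk zap i)

-- evaluation of A's loop body in its three branches
theorem najBody_brk (zap : List Int) (st : Int × PySem.Dict Int Int) (i : Int)
    (h : pvBrk zap i = true) :
    najBody zap st i = (st.1, PySem.Dict.insert PySem.Dict.empty (pvG zap i) i) := by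
  simp only [pvBrk, pvG, bne_iff_ne, ne_eq] at h
  simp [najBody, pvG, h]

theorem najBody_absent (zap : List Int) (st : Int × PySem.Dict Int Int) (i : Int)
    (h : pvBrk zap i = false) (h2 : st.2.contains (pvG zap i) = false) :
    najBody zap st i = (st.1, st.2.insert (pvG zap i) i) := by
  simp only [pvBrk, pvG, bne_eq_false_iff_eq] at h
  simp only [pvG] at h2
  simp [najBody, pvG, h, h2]

theorem najBody_present (zap : List Int) (st : Int × PySem.Dict Int Int) (i : Int)
    (h : pvBrk zap i = false) (h2 : st.2.contains (pvG zap i) = true) :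
    najBody zap st i = (max (i - st.2.getD (pvG zap i) 0 + 1) st.1, st.2) := by
  simp only [pvBrk, pvG, bne_eq_false_iff_eq] at h
  simp only [pvG] at h2
  simp [najBody, pvG, h, h2]

-- the setdefault fold looks up as "first match in d, else first index in l with that value"
theorem pvFirst_fold_get? (zap : List Int) (l : List Int) (d : PySem.Dict Int Int) (v : Int) :
    ((l.foldl (fun d i => d.setdefault (PySem.List.pyGetD zap i 0) i) d).get? v)
      = (d.get? v).or (l.find? (fun i => PySem.List.pyGetD zap i 0 == v)) := by
  induction l generalizing d with
  | nil => simp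
  | cons i l ih =>
    simp only [List.foldl_cons, ih]
    by_cases hc : d.contains (PySem.List.pyGetD zap i 0)
    · rw [PySem.Dict.setdefault_of_contains _ _ hc]
      by_cases hv : PySem.List.pyGetD zap i 0 = v
      · have hs : (d.get? v).isSome := by
          rw [← PySem.Dict.contains_eq_isSome_get?]; rw [hv] at hc; exact hc
        rcases Option.isSome_iff_exists.mp hs with ⟨w, hw⟩
        rw [List.find?_cons_of_pos (by simp [hv]), hw]
        simp
      · rw [List.find?_cons_of_neg (by simp [hv])]
    · rw [PySem.Dict.setdefault_of_not_contains _ _ (by simpa using hc)]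
      by_cases hv : PySem.List.pyGetD zap i 0 = v
      · have hnone : d.get? v = none := by
          rw [← hv]
          rw [PySem.Dict.contains_eq_isSome_get?] at hc
          simpa using hc
        rw [List.find?_cons_of_pos (by simp [hv]), hnone,
          PySem.Dict.get?_insert _ _ _ _, if_pos hv.symm]
        simp
      · rw [List.find?_cons_of_neg (by simp [hv]),
          PySem.Dict.get?_insert _ _ _ _, if_neg (fun h => hv h.symm)]

theorem pvAltFirst_get? (zap : List Int) (s e v : Int) :
    (altFirst zap s e).get? v
      = (PySem.List.pyRange s e 1).find? (fun i => PySem.List.pyGetD zap i 0 == v) := by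
  rw [altFirst, pvFirst_fold_get?]
  simp

-- B's span fold never decreases its accumulator
theorem pvBfold_ge (f : Int → Int) (l : List Int) (naj : Int) :
    naj ≤ l.foldl (fun b i => max b (f i)) naj := by
  induction l generalizing naj with
  | nil => exact le_refl _
  | cons i l ih => exact le_trans (le_max_left _ _) (ih _)

-- the inner segment loop: A's interleaved run from any mid-segment state equals B's span pass
theorem pvSegAux (zap : List Int) (s e : Int) (k : Nat)
    (hseg : ∀ i, s < i → i < e → pvBrk zap i = false) :
    ∀ (j naj : Int) (d : PySem.Dict Int Int), s < j → j ≤ e → (e - j).toNat ≤ k → 1 ≤ naj →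
    (∀ v, d.get? v = (PySem.List.pyRange s j 1).find? (fun i => PySem.List.pyGetD zap i 0 == v)) →
    ((PySem.List.pyRange j e 1).foldl (najBody zap) (naj, d)).1
      = (PySem.List.pyRange j e 1).foldl
          (fun b i => max b (i - (altFirst zap s e).getD (PySem.List.pyGetD zap i 0) 0 + 1)) naj := by
  induction k with
  | zero =>
    intro j naj d hsj hje hk _ _
    have : j = e := by omega
    subst this
    rw [PySem.List.pyRange_one_eq_nil (le_refl j)]
    rfl
  | succ k ih =>
    intro j naj d hsj hje hk hnaj hinv
    by_cases hje' : j < e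
    · rw [PySem.List.pyRange_one_cons hje']
      simp only [List.foldl_cons]
      have hb : pvBrk zap j = false := hseg j hsj hje'
      have hsplit : PySem.List.pyRange s e 1 = PySem.List.pyRange s j 1 ++ PySem.List.pyRange j e 1 :=
        PySem.List.pyRange_one_append s j e (le_of_lt hsj) hje
      -- the B-side lookup at index j
      have hfe : (altFirst zap s e).get? (PySem.List.pyGetD zap j 0)
          = (d.get? (PySem.List.pyGetD zap j 0)).or (some j) := by
        rw [pvAltFirst_get?, hsplit, List.find?_append, ← hinv,
          PySem.List.pyRange_one_cons hje', List.find?_cons_of_pos (by simp)]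
      -- the invariant one step further, for whichever dict has first-occurrences of [s, j+1)
      have hstep : ∀ d' : PySem.Dict Int Int,
          (∀ v, d'.get? v = ((d.get? v).or
            (if PySem.List.pyGetD zap j 0 = v then some j else none))) →
          (∀ v, d'.get? v
            = (PySem.List.pyRange s (j + 1) 1).find? (fun i => PySem.List.pyGetD zap i 0 == v)) := by
        intro d' hd' v
        rw [hd', PySem.List.pyRange_one_succ_right (le_of_lt hsj), List.find?_append, hinv]
        congr 1
        by_cases hv : PySem.List.pyGetD zap j 0 = v
        · simp [List.find?, hv]
        · simp only [List.find?]
          rw [show (PySem.List.pyGetD zap j 0 == v) = false from beq_eq_false_iff_ne.mpr hv]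
          simp [hv]
      cases ho : d.get? (PySem.List.pyGetD zap j 0) with
      | none =>
        have hc : d.contains (PySem.List.pyGetD zap j 0) = false := by
          rw [PySem.Dict.contains_eq_isSome_get?, ho]; rfl
        rw [najBody_absent zap (naj, d) j hb (by simpa [pvG] using hc)]
        have hterm : (altFirst zap s e).getD (PySem.List.pyGetD zap j 0) 0 = j := by
          rw [PySem.Dict.getD_eq_get?_getD, hfe, ho]; rfl
        rw [hterm]
        have : max naj (j - j + 1) = naj := by omega
        rw [this]
        refine ih (j + 1) naj _ (by omega) (by omega) (by omega) hnaj (hstep _ ?_)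
        intro v
        rw [PySem.Dict.get?_insert _ _ _ _]
        by_cases hv : PySem.List.pyGetD zap j 0 = v
        · rw [if_pos (show v = pvG zap j from hv.symm), if_pos hv, ← hv, ho]; rfl
        · rw [if_neg (fun h => hv (show PySem.List.pyGetD zap j 0 = v from h.symm)),
            if_neg hv, Option.or_none]
      | some z =>
        have hc : d.contains (PySem.List.pyGetD zap j 0) = true := by
          rw [PySem.Dict.contains_eq_isSome_get?, ho]; rfl
        rw [najBody_present zap (naj, d) j hb (by simpa [pvG] using hc)]
        have hdz : (naj, d).2.getD (pvG zap j) 0 = z := by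
          show d.getD (PySem.List.pyGetD zap j 0) 0 = z
          rw [PySem.Dict.getD_eq_get?_getD, ho]; rfl
        have hterm : (altFirst zap s e).getD (PySem.List.pyGetD zap j 0) 0 = z := by
          rw [PySem.Dict.getD_eq_get?_getD, hfe, ho]; rfl
        rw [hdz, hterm, max_comm (j - z + 1) naj]
        refine ih (j + 1) _ _ (by omega) (by omega) (by omega)
          (le_trans hnaj (le_max_left _ _)) (hstep _ ?_)
        intro v
        by_cases hv : PySem.List.pyGetD zap j 0 = v
        · rw [if_pos hv, ← hv, ho]; rfl
        · rw [if_neg hv, Option.or_none]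
    · have : j = e := by omega
      subst this
      rw [PySem.List.pyRange_one_eq_nil (le_refl j)]
      rfl

-- a whole segment: A entered it with dict {zap[s]: s}
theorem pvSegLemma (zap : List Int) (s e naj : Int) (hse : s < e) (hnaj : 1 ≤ naj)
    (hseg : ∀ i, s < i → i < e → pvBrk zap i = false) :
    ((PySem.List.pyRange (s + 1) e 1).foldl (najBody zap)
        (naj, PySem.Dict.insert PySem.Dict.empty (pvG zap s) s)).1
      = altSeg zap naj (s, e) := by
  show _ = (PySem.List.pyRange s e 1).foldl
    (fun b i => max b (i - (altFirst zap s e).getD (PySem.List.pyGetD zap i 0) 0 + 1)) naj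
  rw [PySem.List.pyRange_one_cons hse, List.foldl_cons]
  have hterm : (altFirst zap s e).getD (PySem.List.pyGetD zap s 0) 0 = s := by
    rw [PySem.Dict.getD_eq_get?_getD, pvAltFirst_get?, PySem.List.pyRange_one_cons hse,
      List.find?_cons_of_pos (by simp)]
    rfl
  rw [hterm]
  have hmax : max naj (s - s + 1) = naj := by omega
  rw [hmax]
  refine pvSegAux zap s e (e - (s + 1)).toNat hseg (s + 1) naj _ (by omega) (by omega)
    (le_refl _) hnaj ?_
  intro v
  rw [show PySem.List.pyRange s (s + 1) 1 = [s] from PySem.List.pyRange_one_singleton s]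
  rw [PySem.Dict.get?_insert _ _ _ _]
  by_cases hv : PySem.List.pyGetD zap s 0 = v
  · rw [if_pos (show v = pvG zap s from hv.symm)]
    simp [List.find?, hv]
  · rw [if_neg (fun h => hv (show PySem.List.pyGetD zap s 0 = v from h.symm)),
      PySem.Dict.get?_empty]
    simp only [List.find?]
    rw [show (PySem.List.pyGetD zap s 0 == v) = false from beq_eq_false_iff_ne.mpr hv]

-- decomposing the break list of [a, n): head properties
theorem pvBrksCons (zap : List Int) (n : Int) (k : Nat) :
    ∀ (a e : Int) (rest : List Int), (n - a).toNat ≤ k →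
    pvBrks zap a n = e :: rest →
    a ≤ e ∧ e < n ∧ pvBrk zap e = true ∧ (∀ i, a ≤ i → i < e → pvBrk zap i = false) ∧
      pvBrks zap (e + 1) n = rest := by
  induction k with
  | zero =>
    intro a e rest hk h
    exfalso
    by_cases han : a < n
    · omega
    · rw [pvBrks, PySem.List.pyRange_one_eq_nil (by omega)] at h
      simp at h
  | succ k ih =>
    intro a e rest hk h
    by_cases han : a < n
    · rw [pvBrks, PySem.List.pyRange_one_cons han, List.filter_cons] at h
      by_cases hba : pvBrk zap a = true
      · rw [if_pos hba] at h
        rcases List.cons.injEq .. ▸ h with ⟨he, hrest⟩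
        subst he
        exact ⟨le_refl a, han, hba, fun i h1 h2 => absurd (lt_of_lt_of_le h2 h1) (lt_irrefl i),
          hrest⟩
      · rw [if_neg hba] at h
        rcases ih (a + 1) e rest (by omega) h with ⟨h1, h2, h3, h4, h5⟩
        refine ⟨by omega, h2, h3, ?_, h5⟩
        intro i hi1 hi2
        by_cases hia : i = a
        · subst hia; simpa using hba
        · exact h4 i (by omega) hi2
    · rw [pvBrks, PySem.List.pyRange_one_eq_nil (by omega)] at h
      simp at h

-- the glue: A's fused fold over the rest of the list equals B's fold over the remaining segments
theorem pvGlue (zap : List Int) (n : Int) (hn : n = PySem.List.len zap) (k : Nat) :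
    ∀ (s naj : Int), 0 ≤ s → s < n → (n - s).toNat ≤ k → 1 ≤ naj →
    ((PySem.List.pyRange (s + 1) n 1).foldl (najBody zap)
        (naj, PySem.Dict.insert PySem.Dict.empty (pvG zap s) s)).1
      = (((s :: pvBrks zap (s + 1) n).zip (pvBrks zap (s + 1) n ++ [n])).foldl (altSeg zap) naj) := by
  induction k with
  | zero => intro s naj h0 hsn hk; omega
  | succ k ih =>
    intro s naj h0 hsn hk hnaj
    cases hb : pvBrks zap (s + 1) n with
    | nil =>
      have hseg : ∀ i, s < i → i < n → pvBrk zap i = false := by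
        intro i h1 h2
        have := List.filter_eq_nil_iff.mp hb i
          (by rw [PySem.List.mem_pyRange_one]; omega)
        simpa using this
      simp only [List.nil_append, List.zip_cons_cons, List.zip_nil_left, List.foldl_cons,
        List.foldl_nil]
      exact pvSegLemma zap s n naj hsn hnaj hseg
    | cons e rest =>
      rcases pvBrksCons zap n (n - (s + 1)).toNat (s + 1) e rest (le_refl _) hb with
        ⟨h1, h2, h3, h4, h5⟩
      have hsplit : PySem.List.pyRange (s + 1) n 1
          = PySem.List.pyRange (s + 1) e 1 ++ (e :: PySem.List.pyRange (e + 1) n 1) := by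
        rw [PySem.List.pyRange_one_append (s + 1) e n h1 (by omega),
          PySem.List.pyRange_one_cons h2]
      rw [hsplit, List.foldl_append, List.foldl_cons]
      -- A's state after the first segment
      have hst1 : (List.foldl (najBody zap)
          (naj, PySem.Dict.insert PySem.Dict.empty (pvG zap s) s)
          (PySem.List.pyRange (s + 1) e 1)).1 = altSeg zap naj (s, e) :=
        pvSegLemma zap s e naj (by omega) hnaj (fun i hi1 hi2 => h4 i (by omega) hi2)
      rw [najBody_brk zap _ e h3, hst1]
      have hnaj' : 1 ≤ altSeg zap naj (s, e) :=
        le_trans hnaj (pvBfold_ge _ _ _)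
      rw [ih e (altSeg zap naj (s, e)) (by omega) h2 (by omega) hnaj', h5]
      simp [List.zip_cons_cons]

-- ===== VERDICT (by name: the statement is the Claim_ definition above) =====
theorem naloga2c2_spec : Claim_equal_naloga2c2 := by
  intro zap _
  show naloga2c2 zap = naloga2c2_alt zap
  cases zap with
  | nil => rfl
  | cons x0 t =>
    rw [naloga2c2, naloga2c2_alt]
    have hx0 : x0 = pvG (x0 :: t) 0 := by simp [pvG, pysem]
    have hn : (0 : Int) < PySem.List.len (x0 :: t) := by
      simp [PySem.List.len_eq]
    have hglue := pvGlue (x0 :: t) (PySem.List.len (x0 :: t)) rfl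
      (PySem.List.len (x0 :: t)).toNat 0 1 (le_refl 0) hn (le_refl _) (le_refl 1)
    rw [show (0 : Int) + 1 = 1 from rfl, ← hx0] at hglue
    rw [hglue]
    rw [PySem.List.foldl_append_ite_eq_filter]
    have hpred : (fun i => decide
          ((PySem.List.pyGetD (x0 :: t) i 0 - PySem.List.pyGetD (x0 :: t) (i - 1) 0).natAbs ≠ 1))
        = (fun i => pvBrk (x0 :: t) i) := by
      funext i
      simp only [pvBrk, pvG, bne, ne_eq, decide_not]
      rw [Bool.eq_iff_iff]
      simp
    rw [show [(0 : Int)] ++ (PySem.List.pyRange 1 (PySem.List.len (x0 :: t)) 1).filter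
        (fun i => decide ((PySem.List.pyGetD (x0 :: t) i 0
          - PySem.List.pyGetD (x0 :: t) (i - 1) 0).natAbs ≠ 1))
      = (0 : Int) :: pvBrks (x0 :: t) 1 (PySem.List.len (x0 :: t)) by
        rw [hpred]; rfl]
    rfl
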